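-- pv_equiv track=rewrite | github.com/SafBen/hello-world | python/projet_algo_auto/plot.py | f
-- ===== SOURCE A (Python) =====
-- def f(n):
--     X=[]
--     for i in range(1, n):
--         x = i
--         c = 0
--         while x >= 3:
--             x = 2 * x // 3
--             c += 1
--         X.append(c)
--     return X
-- ===== SOURCE B (Python) =====
-- def f(n):
--     # The step count i -> floor(2i/3)-iteration is a nondecreasing step function of i;
--     # compute only the O(log n) thresholds and emit each constant run at once.
--     X = []
--     i, t, c = 1, 3, 0          # counts are c on [i, t); t = next threshold
--     while t < n:
--         X += [c] * (t - i)
--         i, c, t = t, c + 1, (3 * t + 1) // 2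
--     X += [c] * (n - i)
--     return X
-- ===== Notes on version B (the rewrite author's own statement) =====
-- stated objective: faster
-- what changed: Instead of running the x=2x//3 countdown loop separately for every i (O(n log n)), B uses that the step count is a nondecreasing step function of i, computes the O(log n) thresholds t_{c+1}=(3t_c+1)//2 in closed form and emits each constant run of counts at once.
import Mathlib
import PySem

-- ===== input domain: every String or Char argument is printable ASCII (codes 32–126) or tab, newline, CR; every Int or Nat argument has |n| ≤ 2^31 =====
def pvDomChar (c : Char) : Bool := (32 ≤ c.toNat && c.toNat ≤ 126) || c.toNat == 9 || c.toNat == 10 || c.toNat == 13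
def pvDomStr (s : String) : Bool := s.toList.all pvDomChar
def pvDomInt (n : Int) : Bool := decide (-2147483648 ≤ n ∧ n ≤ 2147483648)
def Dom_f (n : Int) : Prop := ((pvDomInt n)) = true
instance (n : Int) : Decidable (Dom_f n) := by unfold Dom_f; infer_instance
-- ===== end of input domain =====

-- B replaces A's per-element ⌊2x/3⌋ countdown loop by the run thresholds of the (nondecreasing)
-- step-count function and fills each constant run at once: faster (asymptotic).
-- Both loops are transcribed with an explicit Nat fuel that provably never runs out
-- (x strictly decreases / t strictly increases), only to make the recursions structural.

-- ===== PORT A =====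
-- A's inner while loop: 'while x >= 3: x = 2*x//3; c += 1', returning the final c.
def fGoAux : Nat → Int → Int → Int
  | 0, _, c => c
  | m + 1, x, c =>
      if 3 ≤ x then fGoAux m (PySem.Int.floordiv (2 * x) 3) (c + 1) else c

def fGo (x c : Int) : Int := fGoAux x.toNat x c

def f (n : Int) : List Int :=
  (PySem.List.pyRange 1 n 1).foldl (fun X i => X ++ [fGo i 0]) []

-- ===== PORT B =====
-- Source B's while loop; state (i, t, c, X): counts are c on [i, t), t = next threshold;
-- on fuel exhaustion (provably only when t ≥ n) it emits the final run, like the loop exit.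
def fRunAux : Nat → Int → Int → Int → Int → List Int → List Int
  | 0, n, i, _, c, acc => acc ++ List.replicate (n - i).toNat c
  | m + 1, n, i, t, c, acc =>
      if t < n then
        fRunAux m n t (PySem.Int.floordiv (3 * t + 1) 2) (c + 1)
          (acc ++ List.replicate (t - i).toNat c)
      else acc ++ List.replicate (n - i).toNat c

def f_alt (n : Int) : List Int := fRunAux (n - 3).toNat n 1 3 0 []

-- ===== PRECONDITION & SPEC =====
def Spec_f (n : Int) (out : List Int) : Prop := out = f_alt n
instance (n : Int) (out : List Int) : Decidable (Spec_f n out) := by unfold Spec_f; infer_instance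

-- ===== CLAIM (what is proved, stated in full; the proofs are below) =====
def Claim_equal_f : Prop := ∀ (n : Int), Dom_f n → Spec_f n (f n)

-- ===== LEMMAS AND PROOFS =====

-- thresholds of the step-count function: fGo x 0 ≥ k+1 ↔ x ≥ thresh k
def thresh : Nat → Int
  | 0 => 3
  | k + 1 => PySem.Int.floordiv (3 * thresh k + 1) 2

theorem thresh_ge (k : Nat) : 3 ≤ thresh k := by
  induction k with
  | zero => simp [thresh]
  | succ k ih =>
    simp only [thresh]
    rw [PySem.Int.floordiv_eq_ediv_of_pos (by omega : (0:Int) < 2)]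
    omega

theorem thresh_lt (k : Nat) : thresh k < thresh (k + 1) := by
  have h := thresh_ge k
  simp only [thresh]
  rw [PySem.Int.floordiv_eq_ediv_of_pos (by omega : (0:Int) < 2)]
  omega

theorem step_toNat_le {x : Int} (m : Nat) (h : 3 ≤ x) (hx : x.toNat ≤ m + 1) :
    (PySem.Int.floordiv (2 * x) 3).toNat ≤ m := by
  rw [PySem.Int.floordiv_eq_ediv_of_pos (by omega : (0:Int) < 3)]
  omega

theorem fGoAux_of_lt (m : Nat) {x : Int} (c : Int) (h : x < 3) : fGoAux m x c = c := by
  cases m with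
  | zero => rfl
  | succ m => rw [fGoAux]; simp [show ¬ (3 ≤ x) by omega]

theorem fGoAux_of_ge (m : Nat) {x : Int} (c : Int) (h : 3 ≤ x) :
    fGoAux (m + 1) x c = fGoAux m (PySem.Int.floordiv (2 * x) 3) (c + 1) := by
  rw [fGoAux]; simp [h]

theorem fGoAux_shift : ∀ (m : Nat) (x c : Int), fGoAux m x c = fGoAux m x 0 + c := by
  intro m
  induction m with
  | zero => intro x c; simp [fGoAux]
  | succ m ih =>
    intro x c
    by_cases h : 3 ≤ x
    · rw [fGoAux_of_ge m c h, fGoAux_of_ge m 0 h, ih _ (c + 1), ih _ (0 + 1)]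
      omega
    · rw [fGoAux_of_lt _ c (by omega), fGoAux_of_lt _ 0 (by omega)]; omega

theorem fGoAux_nonneg : ∀ (m : Nat) (x : Int), 0 ≤ fGoAux m x 0 := by
  intro m
  induction m with
  | zero => intro x; simp [fGoAux]
  | succ m ih =>
    intro x
    by_cases h : 3 ≤ x
    · rw [fGoAux_of_ge m 0 h, fGoAux_shift m _ (0 + 1)]
      have := ih (PySem.Int.floordiv (2 * x) 3)
      omega
    · rw [fGoAux_of_lt _ 0 (by omega)]

-- the threshold characterisation of A's count
theorem cnt_ge_iff (k : Nat) : ∀ (m : Nat) (x : Int), x.toNat ≤ m →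
    (thresh k ≤ x ↔ (k : Int) + 1 ≤ fGoAux m x 0) := by
  induction k with
  | zero =>
    intro m x hm
    simp only [thresh, Nat.cast_zero, zero_add]
    constructor
    · intro h
      cases m with
      | zero => omega
      | succ m =>
        rw [fGoAux_of_ge m 0 h, fGoAux_shift m _ (0 + 1)]
        have := fGoAux_nonneg m (PySem.Int.floordiv (2 * x) 3)
        omega
    · intro h
      by_contra hx
      rw [fGoAux_of_lt m 0 (by omega)] at h
      omega
  | succ k ih =>
    intro m x hm
    have hT := thresh_ge k
    by_cases h : 3 ≤ x
    · have hkey : thresh (k + 1) ≤ x ↔ thresh k ≤ PySem.Int.floordiv (2 * x) 3 := by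
        simp only [thresh]
        rw [PySem.Int.floordiv_eq_ediv_of_pos (by omega : (0:Int) < 2),
            PySem.Int.floordiv_eq_ediv_of_pos (by omega : (0:Int) < 3)]
        omega
      cases m with
      | zero => omega
      | succ m =>
        rw [hkey, ih m _ (step_toNat_le m h hm),
            fGoAux_of_ge m 0 h, fGoAux_shift m _ (0 + 1)]
        push_cast
        omega
    · have h1 := thresh_ge (k + 1)
      rw [fGoAux_of_lt m 0 (by omega)]
      push_cast
      omega

-- a range on which the count is constantly c maps to a replicate
theorem map_cnt_replicate (a b c : Int)
    (hc : ∀ x : Int, a ≤ x → x < b → fGo x 0 = c) :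
    (PySem.List.pyRange a b 1).map (fun x => fGo x 0) = List.replicate (b - a).toNat c := by
  rw [List.eq_replicate_iff]
  constructor
  · simp [PySem.List.length_pyRange_one]
  · intro y hy
    simp only [List.mem_map] at hy
    obtain ⟨x, hx, rfl⟩ := hy
    rw [PySem.List.mem_pyRange_one] at hx
    exact hc x hx.1 hx.2

-- A's fold-with-append is the map of the count
theorem foldl_append_map (l : List Int) : ∀ acc : List Int,
    l.foldl (fun X i => X ++ [fGo i 0]) acc = acc ++ l.map (fun x => fGo x 0) := by
  induction l with
  | nil => intro acc; simp
  | cons a l ih => intro acc; simp [ih]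

-- the loop invariant of B: from state (i, thresh k, k) with enough fuel the loop emits the counts of [i, n)
theorem run_eq : ∀ (m : Nat) (k : Nat) (n i : Int) (acc : List Int),
    (n - thresh k).toNat ≤ m →
    i ≤ thresh k →
    (∀ x : Int, i ≤ x → x < thresh k → fGo x 0 = (k : Int)) →
    fRunAux m n i (thresh k) (k : Int) acc
      = acc ++ (PySem.List.pyRange i n 1).map (fun x => fGo x 0) := by
  intro m
  induction m with
  | zero =>
    intro k n i acc hm hi hc
    have hnt : n ≤ thresh k := by omega
    rw [fRunAux]
    rw [map_cnt_replicate i n (k : Int) (fun x hx1 hx2 => hc x hx1 (by omega))]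
  | succ m ih =>
    intro k n i acc hm hi hc
    by_cases hnt : thresh k < n
    · rw [fRunAux]
      simp only [hnt, if_true]
      have hnext : ∀ x : Int, thresh k ≤ x → x < thresh (k + 1) → fGo x 0 = ((k : Int) + 1) := by
        intro x hx1 hx2
        have h1 := (cnt_ge_iff k x.toNat x (le_refl _)).mp hx1
        have h2 : ¬ thresh (k + 1) ≤ x := by omega
        rw [cnt_ge_iff (k + 1) x.toNat x (le_refl _)] at h2
        unfold fGo
        push_cast at h2 ⊢
        omega
      have hm' : (n - thresh (k + 1)).toNat ≤ m := by
        have := thresh_lt k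
        omega
      have hcast : ((k : Int) + 1) = ((k + 1 : Nat) : Int) := by push_cast; ring
      have hstep :
          fRunAux m n (thresh k) (PySem.Int.floordiv (3 * thresh k + 1) 2) ((k : Int) + 1)
              (acc ++ List.replicate (thresh k - i).toNat (k : Int))
            = (acc ++ List.replicate (thresh k - i).toNat (k : Int))
              ++ (PySem.List.pyRange (thresh k) n 1).map (fun x => fGo x 0) := by
        have := ih (k + 1) n (thresh k) (acc ++ List.replicate (thresh k - i).toNat (k : Int))
          hm' (le_of_lt (thresh_lt k)) (by
            intro x hx1 hx2
            rw [hnext x hx1 hx2, hcast])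
        simp only [thresh] at this
        rw [hcast]
        exact this
      rw [hstep]
      rw [PySem.List.pyRange_one_append i (thresh k) n hi (le_of_lt hnt)]
      rw [List.map_append, ← map_cnt_replicate i (thresh k) (k : Int) hc]
      simp [List.append_assoc]
    · rw [fRunAux]
      simp only [hnt, if_false]
      rw [map_cnt_replicate i n (k : Int) (fun x hx1 hx2 => hc x hx1 (by omega))]

-- ===== VERDICT (by name: the statement is the Claim_ definition above) =====
theorem f_spec : Claim_equal_f := by
  intro n _
  unfold Spec_f f f_alt
  rw [foldl_append_map]
  have h := run_eq (n - 3).toNat 0 n 1 []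
    (by simp only [thresh]; omega)
    (by simp only [thresh]; omega)
    (fun x hx1 hx2 => by
      simp only [thresh] at hx2
      unfold fGo
      exact fGoAux_of_lt _ 0 (by omega))
  simp only [thresh, Nat.cast_zero] at h
  rw [h]
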